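-- pv_equiv track=rewrite | github.com/nicholasbarnfield/ZMCode | ZM.py | compute_LZ_len
-- ===== SOURCE A (Python) =====
-- def compute_LZ_len(y):
--     """
--     Compute the number of words C in LZ-type parsing of y.
--
--     Inputs:
--         y (str): A string.
--
--     Outputs:
--         float: The number of words C.
--     """
--
--     dict = {}
--     i = 0
--     N = len(y)
--
--     while i < N:
--         cur_str = y[i]
--
--         while cur_str in dict and i < N-1:
--             i += 1
--             cur_str += y[i]
--         if cur_str not in dict:
--             dict[cur_str] = None
--         i += 1
--
--     return len(dict)
-- ===== SOURCE B (Python) =====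
-- def compute_LZ_len(y):
--     """
--     Compute the number of words C in LZ-type parsing of y.
--
--     Re-implementation: an LZ78 trie kept as a flat dict keyed by
--     (node_id, char), walked one character at a time, so no substring is
--     ever rebuilt or rehashed.
--     """
--     children = {}
--     node = 0          # 0 is the root
--     next_id = 1
--     count = 0
--     for c in y:
--         child = children.get((node, c))
--         if child is not None:
--             node = child
--         else:
--             children[(node, c)] = next_id
--             next_id += 1
--             count += 1
--             node = 0
--     return count
-- ===== Notes on version B (the rewrite author's own statement) =====
-- stated objective: alternative
-- what changed: Replaces A's dictionary of phrase substrings (rebuilt by concatenation and rehashed in full on every inner-loop membership test) with an LZ78 trie stored as a flat dict keyed by (node_id, char), walked one character at a time in a single pass over the string.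
import Mathlib
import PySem

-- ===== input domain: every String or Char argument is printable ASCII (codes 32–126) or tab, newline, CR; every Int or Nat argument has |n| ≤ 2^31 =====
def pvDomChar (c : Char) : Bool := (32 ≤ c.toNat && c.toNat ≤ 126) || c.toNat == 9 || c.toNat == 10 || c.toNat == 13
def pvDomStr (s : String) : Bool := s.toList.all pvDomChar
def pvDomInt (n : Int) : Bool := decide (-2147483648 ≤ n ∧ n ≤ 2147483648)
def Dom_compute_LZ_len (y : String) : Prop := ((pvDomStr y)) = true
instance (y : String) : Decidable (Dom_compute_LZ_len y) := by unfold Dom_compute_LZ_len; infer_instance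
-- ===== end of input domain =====

-- B replaces A's phrase dictionary of substrings (rebuilt and rehashed character by
-- character) with an LZ78 trie stored as a flat dict keyed by (node_id, char), walking
-- one character at a time; same return value, a different (trie) algorithm.

-- ===== PORT A =====
-- A's dict maps each parsed word (a string, here List Char) to None; only membership
-- and len() are used, so the value type is Unit.
-- Both loops take an explicit fuel argument purely as a structural termination guard
-- (fuel is always sufficient at the call sites: the index i grows on every iteration,
-- so the loops make at most N steps); the fuel-0 branches are never reached.

-- inner while loop:  while cur_str in dict and i < N-1: i += 1; cur_str += y[i]
-- (y[i] is always in range here: the guard gives i+1 <= N-1; getD's default is never used)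
def pvAInner (cs : List Char) (d : PySem.Dict (List Char) Unit) (cur : List Char)
    (i : Nat) : Nat → List Char × Nat
  | 0 => (cur, i)
  | fuel + 1 =>
    if d.contains cur ∧ i < cs.length - 1 then
      pvAInner cs d (cur ++ [cs.getD (i + 1) ' ']) (i + 1) fuel
    else (cur, i)

-- outer while loop:  while i < N: cur_str = y[i]; <inner>; if cur_str not in dict: insert; i += 1
def pvAOuter (cs : List Char) (d : PySem.Dict (List Char) Unit) (i : Nat) : Nat → Int
  | 0 => (d.size : Int)
  | fuel + 1 =>
    if i < cs.length then
      let p := pvAInner cs d [cs.getD i ' '] i cs.length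
      let d' := if ¬ d.contains p.1 then d.insert p.1 () else d
      pvAOuter cs d' (p.2 + 1) fuel
    else (d.size : Int)

def compute_LZ_len (y : String) : Int :=
  pvAOuter y.toList PySem.Dict.empty 0 (y.toList.length + 1)

-- ===== PORT B =====
-- state = (children, node, next_id, count); one step of the for-loop body
def pvBStep (st : PySem.Dict (Int × Char) Int × Int × Int × Int) (c : Char) :
    PySem.Dict (Int × Char) Int × Int × Int × Int :=
  match st with
  | (children, node, nextId, count) =>
    match children.get? (node, c) with
    | some child => (children, child, nextId, count)
    | none => (children.insert (node, c) nextId, 0, nextId + 1, count + 1)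

def compute_LZ_len_alt (y : String) : Int :=
  (y.toList.foldl pvBStep (PySem.Dict.empty, 0, 1, 0)).2.2.2

-- ===== PRECONDITION & SPEC =====
def Spec_compute_LZ_len (y : String) (out : Int) : Prop := out = compute_LZ_len_alt y
instance (y : String) (out : Int) : Decidable (Spec_compute_LZ_len y out) := by unfold Spec_compute_LZ_len; infer_instance

-- ===== CLAIM (what is proved, stated in full; the proofs are below) =====
def Claim_equal_compute_LZ_len : Prop := ∀ (y : String), Dom_compute_LZ_len y → Spec_compute_LZ_len y (compute_LZ_len y)

-- ===== LEMMAS AND PROOFS =====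

-- Reference: the parse as a single pass, one character per step, over an explicit
-- dictionary of words.  `p` is the pending (already-matched) word; each step extends it
-- by one character and tests membership.  Both ports are reduced to this function.
def pvRef (l : List Char) (d : PySem.Dict (List Char) Unit) (p : List Char) : Int :=
  match l with
  | [] => (d.size : Int)
  | c :: rest =>
    if d.contains (p ++ [c]) then pvRef rest d (p ++ [c])
    else pvRef rest (d.insert (p ++ [c]) ()) []

-- ---- A-side: pvAOuter/pvAInner compute pvRef ----

-- one-step unfolding equations for the inner while loop
-- one-step unfolding equations for the inner while loop (any sufficient fuel)
theorem pvAInner_stop (cs : List Char) (d : PySem.Dict (List Char) Unit)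
    (cur : List Char) (i : Nat) (f : Nat)
    (h : ¬ (d.contains cur = true ∧ i < cs.length - 1)) :
    pvAInner cs d cur i f = (cur, i) := by
  cases f with
  | zero => rfl
  | succ f => rw [pvAInner, if_neg h]

theorem pvAInner_step (cs : List Char) (d : PySem.Dict (List Char) Unit)
    (cur : List Char) (i : Nat) (f : Nat)
    (h : d.contains cur = true ∧ i < cs.length - 1) :
    pvAInner cs d cur i (f + 1) = pvAInner cs d (cur ++ [cs.getD (i + 1) ' ']) (i + 1) f := by
  rw [pvAInner, if_pos h]

theorem pvA_eq_ref (cs : List Char) :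
    ∀ n i p d fi fo, cs.length - i = n → i < cs.length →
      cs.length - 1 - i < fi → cs.length - 1 - i < fo →
      pvAOuter cs
        (if ¬ d.contains (pvAInner cs d (p ++ [cs.getD i ' ']) i fi).1 then
          d.insert (pvAInner cs d (p ++ [cs.getD i ' ']) i fi).1 () else d)
        ((pvAInner cs d (p ++ [cs.getD i ' ']) i fi).2 + 1) fo
      = pvRef (cs.drop i) d p := by
  intro n
  induction n with
  | zero => intro i p d fi fo hn hi; omega
  | succ n ih =>
    intro i p d fi fo hn hi hfi hfo
    have hget : cs.getD i ' ' = cs[i] := List.getD_eq_getElem cs ' ' hi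
    rw [hget, List.drop_eq_getElem_cons hi]
    simp only [pvRef]
    by_cases hc : d.contains (p ++ [cs[i]]) = true
    · rw [if_pos hc]
      by_cases hlt : i < cs.length - 1
      · obtain ⟨f, rfl⟩ : ∃ f, fi = f + 1 := ⟨fi - 1, by omega⟩
        rw [pvAInner_step cs d (p ++ [cs[i]]) i f ⟨hc, hlt⟩]
        exact ih (i + 1) (p ++ [cs[i]]) d f fo (by omega) (by omega) (by omega) (by omega)
      · rw [pvAInner_stop cs d (p ++ [cs[i]]) i fi (fun h => hlt h.2)]
        dsimp only
        rw [if_neg (not_not_intro hc)]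
        obtain ⟨f, rfl⟩ : ∃ f, fo = f + 1 := ⟨fo - 1, by omega⟩
        rw [pvAOuter, if_neg (by omega : ¬ i + 1 < cs.length)]
        rw [List.drop_eq_nil_of_le (by omega : cs.length ≤ i + 1)]
        rfl
    · rw [if_neg hc]
      rw [pvAInner_stop cs d (p ++ [cs[i]]) i fi (fun h => hc h.1)]
      dsimp only
      rw [if_pos hc]
      obtain ⟨f, rfl⟩ : ∃ f, fo = f + 1 := ⟨fo - 1, by omega⟩
      by_cases h2 : i + 1 < cs.length
      · rw [pvAOuter, if_pos h2]
        have H := ih (i + 1) [] (d.insert (p ++ [cs[i]]) ()) cs.length f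
          (by omega) h2 (by omega) (by omega)
        simp only [List.nil_append] at H
        exact H
      · rw [pvAOuter, if_neg h2]
        rw [List.drop_eq_nil_of_le (by omega : cs.length ≤ i + 1)]
        rfl

theorem pvA_top (cs : List Char) :
    pvAOuter cs PySem.Dict.empty 0 (cs.length + 1) = pvRef cs PySem.Dict.empty [] := by
  cases cs with
  | nil => rfl
  | cons a t =>
    rw [pvAOuter, if_pos (by simp : 0 < (a :: t).length)]
    have H := pvA_eq_ref (a :: t) (a :: t).length 0 [] PySem.Dict.empty
      (a :: t).length (a :: t).length rfl (by simp) (by simp) (by simp)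
    simp only [List.nil_append, List.drop_zero] at H
    exact H

-- ---- B-side: the trie fold computes pvRef ----

-- walk the trie from node `id` along a word
def pvWalk (ch : PySem.Dict (Int × Char) Int) (id : Int) : List Char → Option Int
  | [] => some id
  | c :: s =>
    match ch.get? (id, c) with
    | some j => pvWalk ch j s
    | none => none

theorem pvWalk_snoc (ch : PySem.Dict (Int × Char) Int) (s : List Char) (c : Char) :
    ∀ id, pvWalk ch id (s ++ [c]) =
      (pvWalk ch id s).bind (fun j => ch.get? (j, c)) := by
  induction s with
  | nil =>
    intro id
    simp only [List.nil_append, pvWalk]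
    cases h : ch.get? (id, c) <;> simp [h]
  | cons a t ih =>
    intro id
    simp only [List.cons_append, pvWalk]
    cases h : ch.get? (id, a) <;> simp [ih]

-- the invariant tying the trie to the dictionary of words
def pvTrieInv (ch : PySem.Dict (Int × Char) Int) (nid : Int)
    (d : PySem.Dict (List Char) Unit) : Prop :=
  (∀ s, d.contains s = true ↔ s ≠ [] ∧ (pvWalk ch 0 s).isSome) ∧
  (∀ s t j, pvWalk ch 0 s = some j → pvWalk ch 0 t = some j → s = t) ∧
  (∀ k v, ch.get? k = some v → k.1 < nid ∧ 1 ≤ v ∧ v < nid) ∧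
  1 ≤ nid

-- a node reached by a walk from the root is the root or a stored child
theorem pvWalk_cases (ch : PySem.Dict (Int × Char) Int) :
    ∀ s id j, pvWalk ch id s = some j → j = id ∨ ∃ k, ch.get? k = some j := by
  intro s
  induction s with
  | nil => intro id j h; simp [pvWalk] at h; exact Or.inl h.symm
  | cons a t ih =>
    intro id j h
    simp only [pvWalk] at h
    cases hg : ch.get? (id, a) with
    | none => rw [hg] at h; exact absurd h (by simp)
    | some j1 =>
      rw [hg] at h
      rcases ih j1 j h with h1 | h1
      · exact Or.inr ⟨(id, a), h1 ▸ hg⟩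
      · exact Or.inr h1

-- inserting an absent edge preserves existing walks
theorem pvWalk_insert_mono (ch : PySem.Dict (Int × Char) Int) (k0 : Int × Char)
    (v0 : Int) (h0 : ch.get? k0 = none) :
    ∀ s id j, pvWalk ch id s = some j → pvWalk (ch.insert k0 v0) id s = some j := by
  intro s
  induction s with
  | nil => intro id j h; exact h
  | cons a t ih =>
    intro id j h
    simp only [pvWalk] at h ⊢
    cases hg : ch.get? (id, a) with
    | none => rw [hg] at h; exact absurd h (by simp)
    | some j1 =>
      rw [hg] at h
      have hne : (id, a) ≠ k0 := by
        intro he; rw [he, h0] at hg; exact absurd hg (by simp)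
      rw [PySem.Dict.get?_insert, if_neg hne, hg]
      exact ih j1 j h

-- a successful walk in the extended trie is an old walk or ends with the new edge
theorem pvWalk_insert_char (ch : PySem.Dict (Int × Char) Int) (nid node : Int)
    (c : Char)
    (hfresh : ∀ k v, ch.get? k = some v → k.1 < nid ∧ 1 ≤ v ∧ v < nid)
    (hnode : node < nid) :
    ∀ s id j, id ≠ nid → pvWalk (ch.insert (node, c) nid) id s = some j →
      pvWalk ch id s = some j ∨
        (∃ s1, s = s1 ++ [c] ∧ pvWalk ch id s1 = some node ∧ j = nid) := by
  intro s
  induction s with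
  | nil => intro id j _ h; exact Or.inl h
  | cons a t ih =>
    intro id j hid h
    simp only [pvWalk] at h
    by_cases hk : ((id : Int), a) = (node, c)
    · -- the walk takes the new edge: it must stop right there
      rw [PySem.Dict.get?_insert, if_pos hk] at h
      obtain ⟨hidn, hac⟩ := Prod.mk.injEq .. ▸ hk
      cases t with
      | nil =>
        simp only [pvWalk, Option.some.injEq] at h
        exact Or.inr ⟨[], by simp [hac], by simp [pvWalk, hidn], h.symm⟩
      | cons b t' =>
        -- no edge leaves the fresh node nid
        exfalso
        simp only [pvWalk] at h
        have hb : (ch.insert (node, c) nid).get? (nid, b) = none := by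
          rw [PySem.Dict.get?_insert, if_neg (by
            intro he
            have : nid = node := (Prod.mk.injEq .. ▸ he).1
            omega)]
          cases hg : ch.get? (nid, b) with
          | none => rfl
          | some v => exact absurd ((hfresh _ v hg).1) (by simp)
        rw [hb] at h
        exact absurd h (by simp)
    · rw [PySem.Dict.get?_insert, if_neg hk] at h
      cases hg : ch.get? (id, a) with
      | none => rw [hg] at h; exact absurd h (by simp)
      | some j1 =>
        rw [hg] at h
        have hj1 : j1 ≠ nid := by
          have := (hfresh _ j1 hg).2.2; omega
        rcases ih j1 j hj1 h with h1 | ⟨s1, hs1, hw, hj⟩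
        · exact Or.inl (by simp only [pvWalk, hg]; exact h1)
        · exact Or.inr ⟨a :: s1, by simp [hs1], by simp only [pvWalk, hg]; exact hw, hj⟩

theorem pvB_eq_ref :
    ∀ (l : List Char) ch node nid count d p,
      pvTrieInv ch nid d →
      pvWalk ch 0 p = some node →
      count = (d.size : Int) →
      (l.foldl pvBStep (ch, node, nid, count)).2.2.2 = pvRef l d p := by
  intro l
  induction l with
  | nil => intro ch node nid count d p _ _ hcount; simpa [pvRef] using hcount
  | cons c rest ih =>
    intro ch node nid count d p hinv hp hcount
    obtain ⟨hcont, hinj, hfresh, hnid⟩ := hinv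
    have hpc : pvWalk ch 0 (p ++ [c]) = (ch.get? (node, c)) := by
      rw [pvWalk_snoc, hp]; rfl
    simp only [List.foldl_cons, pvBStep, pvRef]
    cases hg : ch.get? (node, c) with
    | some child =>
      -- the word p ++ [c] is already in the dictionary: descend
      have hw : pvWalk ch 0 (p ++ [c]) = some child := by rw [hpc, hg]
      have hin : d.contains (p ++ [c]) = true :=
        (hcont (p ++ [c])).2 ⟨by simp, by rw [hw]; rfl⟩
      rw [if_pos hin]
      exact ih ch child nid count d (p ++ [c]) ⟨hcont, hinj, hfresh, hnid⟩ hw hcount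
    | none =>
      -- new word: add the edge (node, c) ↦ nid, restart at the root
      have hw : pvWalk ch 0 (p ++ [c]) = none := by rw [hpc, hg]
      have hnotin : d.contains (p ++ [c]) = false := by
        cases hcb : d.contains (p ++ [c]) with
        | false => rfl
        | true =>
          have := ((hcont (p ++ [c])).1 hcb).2
          rw [hw] at this; exact absurd this (by simp)
      rw [if_neg (by simp [hnotin])]
      have hnode : node < nid := by
        rcases pvWalk_cases ch p 0 node hp with h | ⟨k, hk⟩
        · omega
        · exact (hfresh k node hk).2.2
      set ch' := ch.insert (node, c) nid with hch'
      -- walks in ch' : the two characterisation lemmas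
      have hmono := pvWalk_insert_mono ch (node, c) nid hg
      have hchar := pvWalk_insert_char ch nid node c hfresh hnode
      have hwpc' : pvWalk ch' 0 (p ++ [c]) = some nid := by
        rw [pvWalk_snoc, hmono p 0 node hp]
        simp [hch', PySem.Dict.get?_insert]
      refine ih ch' 0 (nid + 1) (count + 1) (d.insert (p ++ [c]) ()) []
        ⟨?_, ?_, ?_, by omega⟩ rfl ?_
      · -- contains ↔ walk
        intro s
        rw [PySem.Dict.contains_insert]
        constructor
        · intro hb
          rcases Bool.or_eq_true_iff.1 hb with hb | hb
          · have hs : s = p ++ [c] := by simpa using hb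
            exact ⟨by simp [hs], by rw [hs, hwpc']; rfl⟩
          · obtain ⟨hne, hsome⟩ := (hcont s).1 hb
            obtain ⟨j, hj⟩ := Option.isSome_iff_exists.1 hsome
            exact ⟨hne, by rw [hmono s 0 j hj]; rfl⟩
        · rintro ⟨hne, hsome⟩
          obtain ⟨j, hj⟩ := Option.isSome_iff_exists.1 hsome
          rcases hchar s 0 j (by omega) hj with h1 | ⟨s1, hs1, hw1, _⟩
          · exact Bool.or_eq_true_iff.2 (Or.inr ((hcont s).2
              ⟨hne, by rw [h1]; rfl⟩))
          · have : s1 = p := hinj s1 p node hw1 hp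
            exact Bool.or_eq_true_iff.2 (Or.inl (by simp [hs1, this]))
      · -- injectivity
        intro s t j hs ht
        rcases hchar s 0 j (by omega) hs with h1 | ⟨s1, hs1, hw1, hj1⟩ <;>
          rcases hchar t 0 j (by omega) ht with h2 | ⟨t1, ht1, hw2, hj2⟩
        · exact hinj s t j h1 h2
        · -- old walk reaches the fresh node nid: impossible
          exfalso
          rcases pvWalk_cases ch s 0 j h1 with h | ⟨k, hk⟩ <;>
            [omega; exact absurd ((hfresh k j hk).2.2) (by omega)]
        · exfalso
          rcases pvWalk_cases ch t 0 j h2 with h | ⟨k, hk⟩ <;>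
            [omega; exact absurd ((hfresh k j hk).2.2) (by omega)]
        · rw [hs1, ht1, hinj s1 t1 node hw1 hw2]
      · -- freshness
        intro k v hk
        rw [hch', PySem.Dict.get?_insert] at hk
        by_cases hkk : k = (node, c)
        · rw [if_pos hkk] at hk
          have : v = nid := by simpa using hk.symm
          subst this
          exact ⟨by rw [hkk]; simpa using by omega, by omega, by omega⟩
        · rw [if_neg hkk] at hk
          have := hfresh k v hk
          exact ⟨by omega, by omega, by omega⟩
      · -- count
        rw [PySem.Dict.size_insert, if_neg (by simp [hnotin])]
        push_cast
        omega

-- ===== VERDICT (by name: the statement is the Claim_ definition above) =====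
theorem compute_LZ_len_spec : Claim_equal_compute_LZ_len := by
  intro y _
  unfold Spec_compute_LZ_len compute_LZ_len compute_LZ_len_alt
  rw [pvA_top]
  refine (pvB_eq_ref y.toList PySem.Dict.empty 0 1 0 PySem.Dict.empty [] ?_ rfl (by simp)).symm
  refine ⟨?_, ?_, ?_, le_refl 1⟩
  · intro s
    constructor
    · intro h; rw [PySem.Dict.contains_empty] at h; exact absurd h (by simp)
    · rintro ⟨hne, hsome⟩
      cases s with
      | nil => exact absurd rfl hne
      | cons a t => simp [pvWalk, PySem.Dict.get?_empty] at hsome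
  · intro s t j hs ht
    cases s with
    | nil =>
      cases t with
      | nil => rfl
      | cons a t' => simp [pvWalk, PySem.Dict.get?_empty] at ht
    | cons a s' => simp [pvWalk, PySem.Dict.get?_empty] at hs
  · intro k v h; rw [PySem.Dict.get?_empty] at h; exact absurd h (by simp)
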